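-- pv_equiv track=rewrite | github.com/Flitternie/GraphQ_IR | parser/ir/misc.py | replace_variable
-- ===== SOURCE A (Python) =====
-- def replace_variable(query, variable):
--     """
--     replace variable in query, and return new query and new variable
--     e.g., query='?e <parent> ?e_1', variable='?e', then results should be '?e_1 <parent> ?e_2' and '?e_1'
--     """
--     if contain_variable(query, variable):
--         if '_' in variable:
--             prefix, idx = variable.split('_')
--             idx = int(idx)
--         else:
--             prefix = variable
--             idx = 0
--         new_variable = '{}_{}'.format(prefix, idx+1)
--         if contain_variable(query, new_variable):
--             query, _ = replace_variable(query, new_variable)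
--         query = ' '.join([new_variable if w == variable else w for w in query.split()]) + ' ' # DONT forget the space
--         return query, new_variable
--     else:
--         return query, variable
--
-- def contain_variable(query, variable):
--     return variable in query.split()
-- ===== SOURCE B (Python) =====
-- def _bump(variable):
--     if '_' in variable:
--         prefix, idx = variable.split('_')
--         return '{}_{}'.format(prefix, int(idx) + 1)
--     return '{}_{}'.format(variable, 1)
--
-- def replace_variable(query, variable):
--     words = query.split()
--     if variable not in words:
--         return query, variable
--     pairs = []
--     cur = variable
--     while cur in words:
--         nxt = _bump(cur)
--         pairs.append((cur, nxt))
--         cur = nxt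
--     for old, new in reversed(pairs):
--         words = [new if w == old else w for w in words]
--     return ' '.join(words) + ' ', pairs[0][1]
-- ===== Notes on version B (the rewrite author's own statement) =====
-- stated objective: alternative
-- what changed: B replaces A's cascading recursion (which re-splits and re-joins the whole query string at every chain level) by an explicit two-phase computation: an iterative loop first collects the (name, bumped-name) rename chain, then the renames are applied deepest-first as passes over the once-split word list, with a single join at the end.
import Mathlib
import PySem

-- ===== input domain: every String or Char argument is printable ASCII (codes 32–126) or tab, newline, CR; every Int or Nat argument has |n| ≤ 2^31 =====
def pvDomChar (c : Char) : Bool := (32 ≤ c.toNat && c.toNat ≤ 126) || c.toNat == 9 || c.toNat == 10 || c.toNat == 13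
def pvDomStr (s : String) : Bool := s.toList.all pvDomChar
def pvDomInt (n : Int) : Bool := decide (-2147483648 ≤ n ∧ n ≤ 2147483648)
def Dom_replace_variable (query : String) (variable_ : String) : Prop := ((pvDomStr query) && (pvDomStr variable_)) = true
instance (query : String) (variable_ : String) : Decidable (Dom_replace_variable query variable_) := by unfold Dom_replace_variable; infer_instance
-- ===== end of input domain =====

-- B computes the rename chain first with an iterative loop, splits the query once and applies the
-- renames as passes over that word list (deepest first), joining once at the end; A's recursion
-- re-splits and re-joins the whole query string at every chain level.  Objective: alternative.

-- ===== PORT A =====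
def contain_variable (query : String) (variable_ : String) : Bool :=
  (PySem.Str.split₀ query).contains variable_

-- fueled transliteration of A's recursion; the fuel (number of words + 1) is a totality guard
-- only: Python's recursion depth is bounded by the number of distinct words of the query.
def replaceVarA : Nat → String → String → String × String
  | 0, query, v => (query, v)
  | (fuel+1), query, v =>
    if contain_variable query v then
      -- 'prefix, idx = variable.split('_'); idx = int(idx)' (none = ValueError)
      match (if PySem.Str.isIn "_" v then
               match PySem.Str.split? v "_" with
               | some [p, i] =>
                 (match PySem.Int.ofStr? i with
                  | some n => some (p, n)
                  | none => none)
               | _ => none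
             else some (v, 0) : Option (String × Int)) with
      | none => (query, v)   -- Python raises ValueError here (outside Pre_)
      | some (p, idx) =>
        let nv := PySem.Str.join "" [p, "_", PySem.Int.toStr (idx + 1)]
        let q1 := if contain_variable query nv then (replaceVarA fuel query nv).1 else query
        (PySem.Str.join "" [PySem.Str.join " "
            ((PySem.Str.split₀ q1).map (fun w => if w == v then nv else w)), " "], nv)
    else (query, v)

def replace_variable (query : String) (variable_ : String) : String × String :=
  replaceVarA ((PySem.Str.split₀ query).length + 1) query variable_

-- ===== PORT B =====
-- helper _bump of Source B (none = ValueError of int()/tuple unpacking)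
def bump (v : String) : Option String :=
  if PySem.Str.isIn "_" v then
    match PySem.Str.split? v "_" with
    | some [p, i] =>
      (match PySem.Int.ofStr? i with
       | some n => some (PySem.Str.join "" [p, "_", PySem.Int.toStr (n + 1)])
       | none => none)
    | _ => none
  else some (PySem.Str.join "" [v, "_", PySem.Int.toStr 1])

-- the while loop collecting (cur, _bump(cur)) pairs; fuel is a totality guard only
def chainPairs : Nat → List String → String → List (String × String)
  | 0, _, _ => []
  | (fuel+1), words, cur =>
    if words.contains cur then
      match bump cur with
      | some nxt => (cur, nxt) :: chainPairs fuel words nxt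
      | none => []   -- Python raises ValueError here (outside Pre_)
    else []

-- one rename pass: [new if w == old else w for w in words]
def applyPass (ws : List String) (pr : String × String) : List String :=
  ws.map (fun w => if w == pr.1 then pr.2 else w)

def replace_variable_alt (query : String) (variable_ : String) : String × String :=
  let words := PySem.Str.split₀ query
  if words.contains variable_ then
    let pairs := chainPairs (words.length + 1) words variable_
    let ws := pairs.reverse.foldl applyPass words
    (PySem.Str.join "" [PySem.Str.join " " ws, " "], (pairs.headD (variable_, variable_)).2)
  else (query, variable_)

-- ===== PRECONDITION & SPEC =====
-- Pre_ excludes exactly the inputs where A raises ValueError: the variable occurs as a word of the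
-- query, contains '_', and does not split into exactly two parts with an int()-parsable second part.
def Pre_replace_variable (query : String) (variable_ : String) : Prop :=
  (PySem.Str.split₀ query).contains variable_ = true →
  PySem.Str.isIn "_" variable_ = true →
  ((PySem.Str.split? variable_ "_").getD []).length = 2 ∧
  (PySem.Int.ofStr? (((PySem.Str.split? variable_ "_").getD []).getD 1 "")).isSome = true

instance (query : String) (variable_ : String) : Decidable (Pre_replace_variable query variable_) := by
  unfold Pre_replace_variable; infer_instance

def pvWitness_replace_variable : String × String := ("?e <parent> ?e_1", "?e")

def Spec_replace_variable (query : String) (variable_ : String) (out : String × String) : Prop :=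
  out = replace_variable_alt query variable_
instance (query : String) (variable_ : String) (out : String × String) : Decidable (Spec_replace_variable query variable_ out) := by
  unfold Spec_replace_variable; infer_instance

-- ===== CLAIM (what is proved, stated in full; the proofs are below) =====
def Claim_equal_replace_variable : Prop := ∀ (query : String) (variable_ : String), Dom_replace_variable query variable_ → Pre_replace_variable query variable_ → Spec_replace_variable query variable_ (replace_variable query variable_)

-- ===== LEMMAS AND PROOFS =====

-- a well-formed word: nonempty and whitespace-free (what query.split() produces and what the
-- rename passes preserve)
def wfW (w : List Char) : Prop := w ≠ [] ∧ ∀ c ∈ w, PySem.Chars.isspace c = false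

theorem isspace_digitChar (d : Nat) (h : d < 10) :
    PySem.Chars.isspace (Nat.digitChar d) = false := by
  interval_cases d <;> decide

theorem isspace_toDigitsCore (fuel n : Nat) (acc : List Char) :
    ∀ c ∈ Nat.toDigitsCore 10 fuel n acc, PySem.Chars.isspace c = false ∨ c ∈ acc := by
  induction fuel generalizing n acc with
  | zero => intro c hc; simp [Nat.toDigitsCore] at hc; exact Or.inr hc
  | succ fuel ih =>
    intro c hc
    simp only [Nat.toDigitsCore] at hc
    by_cases h0 : n / 10 = 0
    · simp [h0] at hc
      rcases hc with h | h
      · exact Or.inl (h ▸ isspace_digitChar _ (Nat.mod_lt _ (by norm_num)))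
      · exact Or.inr h
    · simp [h0] at hc
      rcases ih _ _ _ hc with h | h
      · exact Or.inl h
      · rcases List.mem_cons.mp h with h | h
        · exact Or.inl (h ▸ isspace_digitChar _ (Nat.mod_lt _ (by norm_num)))
        · exact Or.inr h

theorem isspace_toChars (m : Int) : ∀ c ∈ PySem.Int.toChars m, PySem.Chars.isspace c = false := by
  intro c hc
  unfold PySem.Int.toChars at hc
  split at hc
  · rcases List.mem_cons.mp hc with h | h
    · subst h; decide
    · rcases isspace_toDigitsCore _ _ _ _ h with h | h
      · exact h
      · simp at h
  · rcases isspace_toDigitsCore _ _ _ _ hc with h | h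
    · exact h
    · simp at h

-- split('_') round-trip: joining the parts with the separator gives the string back
theorem splitOn_go_join (sep : List Char) :
    ∀ (fuel : Nat) (l cur : List Char) (acc : List (List Char)),
      ∃ parts, PySem.Chars.splitOn.go sep fuel l cur acc = acc.reverse ++ parts ∧ parts ≠ [] ∧
        PySem.Chars.join sep parts = cur.reverse ++ l := by
  intro fuel
  induction fuel with
  | zero =>
    intro l cur acc
    exact ⟨[cur.reverse ++ l], by simp [PySem.Chars.splitOn.go], by simp,
      by simp [PySem.Chars.join_singleton]⟩
  | succ fuel ih =>
    intro l cur acc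
    cases l with
    | nil =>
      exact ⟨[cur.reverse], by simp [PySem.Chars.splitOn.go], by simp,
        by simp [PySem.Chars.join_singleton]⟩
    | cons c rest =>
      by_cases hp : sep.isPrefixOf (c :: rest) = true
      · obtain ⟨parts, h1, h2, h3⟩ := ih (List.drop sep.length (c :: rest)) [] (cur.reverse :: acc)
        refine ⟨cur.reverse :: parts, ?_, by simp, ?_⟩
        · simp only [PySem.Chars.splitOn.go, hp, if_true, h1]
          simp
        · obtain ⟨t, ht⟩ := (List.isPrefixOf_iff_prefix.mp hp)
          match parts with
          | p1 :: prest =>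
            rw [PySem.Chars.join_cons_cons, h3, ← ht]
            simp
          | [] => exact absurd rfl h2
      · obtain ⟨parts, h1, h2, h3⟩ := ih rest (c :: cur) acc
        refine ⟨parts, ?_, h2, ?_⟩
        · simp only [PySem.Chars.splitOn.go, hp]
          simpa using h1
        · rw [h3]; simp

theorem join_splitOn (s sep : List Char) :
    PySem.Chars.join sep (PySem.Chars.splitOn s sep) = s := by
  obtain ⟨parts, h1, h2, h3⟩ := splitOn_go_join sep (s.length + 1) s [] []
  unfold PySem.Chars.splitOn
  rw [h1]; simpa using h3

-- v.split('_') = [p, i]  →  v = p ++ '_' ++ i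
theorem split_two (v p i : String) (h : PySem.Str.split? v "_" = some [p, i]) :
    v.toList = p.toList ++ '_' :: i.toList := by
  have hm := PySem.Str.split?_map v "_"
  rw [h] at hm
  have hsep : ("_" : String).toList = ['_'] := by decide
  rw [hsep] at hm
  have hsplit : PySem.Chars.split? v.toList ['_'] = some (PySem.Chars.splitOn v.toList ['_']) := by
    simp [PySem.Chars.split?]
  rw [hsplit] at hm
  simp only [Option.map_some, List.map_cons, List.map_nil, Option.some.injEq] at hm
  have hj := join_splitOn v.toList ['_']
  rw [← hm] at hj
  rw [PySem.Chars.join_cons_cons, PySem.Chars.join_singleton] at hj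
  simpa using hj.symm

-- every word of query.split() is nonempty and whitespace-free
theorem split₀_go_wf : ∀ (l cur : List Char) (acc : List (List Char)),
    (∀ w ∈ acc, wfW w) → (∀ c ∈ cur, PySem.Chars.isspace c = false) →
    ∀ w ∈ PySem.Chars.split₀.go l cur acc, wfW w := by
  intro l
  induction l with
  | nil =>
    intro cur acc ha hc w hw
    by_cases he : cur.isEmpty
    · simp [PySem.Chars.split₀.go, he] at hw
      exact ha _ hw
    · simp [PySem.Chars.split₀.go, he] at hw
      rcases hw with h | h
      · exact ha _ h
      · subst h
        refine ⟨by simpa using (List.isEmpty_eq_false_iff.mp (by simpa using he)), ?_⟩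
        intro c hcm; exact hc _ (List.mem_reverse.mp hcm)
  | cons c rest ih =>
    intro cur acc ha hc w hw
    by_cases hs : PySem.Chars.isspace c = true
    · by_cases he : cur.isEmpty
      · simp only [PySem.Chars.split₀.go, hs, he, if_true] at hw
        exact ih [] acc ha (by simp) w hw
      · simp only [PySem.Chars.split₀.go, hs, he, if_true, if_false, Bool.false_eq_true] at hw
        refine ih [] (cur.reverse :: acc) ?_ (by simp) w hw
        intro w' hw'
        rcases List.mem_cons.mp hw' with h | h
        · subst h
          refine ⟨by simpa using (List.isEmpty_eq_false_iff.mp (by simpa using he)), ?_⟩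
          intro c' hcm; exact hc _ (List.mem_reverse.mp hcm)
        · exact ha _ h
    · simp only [PySem.Chars.split₀.go, hs, Bool.false_eq_true, if_false] at hw
      refine ih (c :: cur) acc ha ?_ w hw
      intro c' hcm
      rcases List.mem_cons.mp hcm with h | h
      · subst h; simpa using hs
      · exact hc _ h

theorem split₀_wf (s : String) : ∀ w ∈ PySem.Str.split₀ s, wfW w.toList := by
  intro w hw
  have : w.toList ∈ (PySem.Str.split₀ s).map String.toList := List.mem_map_of_mem hw
  rw [PySem.Str.split₀_map_toList] at this
  unfold PySem.Chars.split₀ at this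
  exact split₀_go_wf _ [] [] (by simp) (by simp) _ this

-- split₀.go consumes a whole whitespace-free block into the current word
theorem split₀_go_word : ∀ (w rest cur : List Char) (acc : List (List Char)),
    (∀ c ∈ w, PySem.Chars.isspace c = false) →
    PySem.Chars.split₀.go (w ++ rest) cur acc = PySem.Chars.split₀.go rest (w.reverse ++ cur) acc := by
  intro w
  induction w with
  | nil => intro rest cur acc _; simp
  | cons c w' ih =>
    intro rest cur acc h
    have hc : PySem.Chars.isspace c = false := h _ (List.mem_cons_self ..)
    rw [List.cons_append]
    simp only [PySem.Chars.split₀.go, hc, Bool.false_eq_true, if_false]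
    rw [ih rest (c :: cur) acc (fun c' hc' => h _ (List.mem_cons_of_mem _ hc'))]
    simp

-- split ∘ (join-with-spaces + trailing space) is the identity on well-formed word lists
theorem split₀_join : ∀ (ws : List (List Char)) (acc : List (List Char)),
    (∀ w ∈ ws, wfW w) →
    PySem.Chars.split₀.go (PySem.Chars.join [' '] ws ++ [' ']) [] acc = acc.reverse ++ ws := by
  intro ws
  induction ws with
  | nil =>
    intro acc _
    simp [PySem.Chars.join_nil, PySem.Chars.split₀.go,
      (by decide : PySem.Chars.isspace ' ' = true)]
  | cons w ws' ih =>
    intro acc h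
    obtain ⟨hne, hsp⟩ := h w (List.mem_cons_self ..)
    have hrevne : (w.reverse).isEmpty = false := by
      simp [List.isEmpty_eq_false_iff, hne]
    cases ws' with
    | nil =>
      rw [PySem.Chars.join_singleton]
      rw [split₀_go_word w [' '] [] acc hsp]
      simp only [PySem.Chars.split₀.go, List.append_nil, hrevne,
        (by decide : PySem.Chars.isspace ' ' = true), if_true, Bool.false_eq_true, if_false]
      simp
    | cons w2 rest' =>
      rw [PySem.Chars.join_cons_cons]
      have hassoc : (w ++ [' '] ++ PySem.Chars.join [' '] (w2 :: rest')) ++ [' ']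
          = w ++ (' ' :: (PySem.Chars.join [' '] (w2 :: rest') ++ [' '])) := by
        simp
      rw [hassoc, split₀_go_word w _ [] acc hsp]
      simp only [PySem.Chars.split₀.go, List.append_nil, hrevne,
        (by decide : PySem.Chars.isspace ' ' = true), if_true, Bool.false_eq_true, if_false]
      rw [List.reverse_reverse]
      rw [ih (w :: acc) (fun w' hw' => h _ (List.mem_cons_of_mem _ hw'))]
      simp

theorem toList_injective : Function.Injective String.toList := by
  intro a b h
  have := congrArg String.ofList h
  rwa [String.ofList_toList, String.ofList_toList] at this

-- three-part concatenations, as produced by Str.join "" [·,·,·]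
theorem toList_join3 (a b c : String) :
    (PySem.Str.join "" [a, b, c]).toList = a.toList ++ b.toList ++ c.toList := by
  rw [PySem.Str.toList_join]
  simp [PySem.Chars.join, List.intercalate]

theorem toList_join2 (a b : String) :
    (PySem.Str.join "" [a, b]).toList = a.toList ++ b.toList := by
  rw [PySem.Str.toList_join]
  simp [PySem.Chars.join, List.intercalate]

theorem split₀_strOf (ws : List String) (h : ∀ w ∈ ws, wfW w.toList) :
    PySem.Str.split₀ (PySem.Str.join "" [PySem.Str.join " " ws, " "]) = ws := by
  apply List.map_injective_iff.mpr toList_injective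
  rw [PySem.Str.split₀_map_toList, toList_join2]
  rw [PySem.Str.toList_join]
  have hsp : (" " : String).toList = [' '] := by decide
  rw [hsp]
  unfold PySem.Chars.split₀
  rw [split₀_join (ws.map String.toList) []
    (by intro w hw; obtain ⟨w', hw', rfl⟩ := List.mem_map.mp hw; exact h _ hw')]
  simp

-- chain facts
theorem chainPairs_mem : ∀ (f : Nat) (ws : List String) (cur : String),
    ∀ pr ∈ chainPairs f ws cur, pr.1 ∈ ws ∧ bump pr.1 = some pr.2 := by
  intro f
  induction f with
  | zero => intro ws cur pr hpr; simp [chainPairs] at hpr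
  | succ f ih =>
    intro ws cur pr hpr
    simp only [chainPairs] at hpr
    by_cases hm : ws.contains cur = true
    · rw [if_pos hm] at hpr
      cases hb : bump cur with
      | none => simp [hb] at hpr
      | some nxt =>
        simp only [hb, List.mem_cons] at hpr
        rcases hpr with h | h
        · subst h; exact ⟨by simpa using hm, hb⟩
        · exact ih _ _ _ h
    · rw [if_neg hm] at hpr; simp at hpr

theorem chainPairs_not_contains (f : Nat) (ws : List String) (cur : String)
    (h : ws.contains cur = false) : chainPairs f ws cur = [] := by
  cases f with
  | zero => rfl
  | succ g => simp only [chainPairs, h, Bool.false_eq_true, if_false]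

theorem bump_wf (x y : String) (h : bump x = some y)
    (hx : ∀ c ∈ x.toList, PySem.Chars.isspace c = false) : wfW y.toList := by
  unfold bump at h
  by_cases hu : PySem.Str.isIn "_" x = true
  · rw [if_pos hu] at h
    cases hsp : PySem.Str.split? x "_" with
    | none => rw [hsp] at h; simp at h
    | some l =>
      rw [hsp] at h
      match l with
      | [] => simp at h
      | [_] => simp at h
      | (p :: i :: _ :: _) => simp at h
      | [p, i] =>
        cases hof : PySem.Int.ofStr? i with
        | none => simp [hof] at h
        | some n =>
          simp only [hof, Option.some.injEq] at h
          subst h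
          rw [toList_join3, PySem.Int.toList_toStr]
          have hv := split_two x p i hsp
          constructor
          · simp [(by decide : ("_" : String).toList = ['_'])]
          · intro c hc
            rcases List.mem_append.mp hc with hc | hc
            · rcases List.mem_append.mp hc with hc | hc
              · exact hx _ (hv ▸ List.mem_append_left _ hc)
              · simp [(by decide : ("_" : String).toList = ['_'])] at hc
                subst hc; decide
            · exact isspace_toChars _ _ hc
  · rw [if_neg hu] at h
    simp only [Option.some.injEq] at h
    subst h
    rw [toList_join3, PySem.Int.toList_toStr]
    constructor
    · simp [(by decide : ("_" : String).toList = ['_'])]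
    · intro c hc
      rcases List.mem_append.mp hc with hc | hc
      · rcases List.mem_append.mp hc with hc | hc
        · exact hx _ hc
        · simp [(by decide : ("_" : String).toList = ['_'])] at hc
          subst hc; decide
      · exact isspace_toChars _ _ hc

theorem passes_wf : ∀ (prs : List (String × String)) (ws : List String),
    (∀ w ∈ ws, wfW w.toList) → (∀ pr ∈ prs, wfW pr.2.toList) →
    ∀ w ∈ prs.foldl applyPass ws, wfW w.toList := by
  intro prs
  induction prs with
  | nil => intro ws hws _ w hw; exact hws _ (by simpa using hw)
  | cons pr rest ih =>
    intro ws hws hprs w hw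
    rw [List.foldl_cons] at hw
    refine ih (applyPass ws pr) ?_ (fun p hp => hprs _ (List.mem_cons_of_mem _ hp)) w hw
    intro w' hw'
    obtain ⟨w0, hw0, rfl⟩ := List.mem_map.mp hw'
    by_cases he : (w0 == pr.1) = true
    · simp only [he, if_true]
      exact hprs _ (List.mem_cons_self ..)
    · simp only [he, Bool.false_eq_true, if_false]
      exact hws _ hw0

-- the outer rename pass on top of the inner result equals the pass-fold of the extended chain
theorem some_branch (F : Nat) (q v nv : String)
    (hcv : (PySem.Str.split₀ q).contains v = true)
    (hb : bump v = some nv)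
    (hinner : PySem.Str.split₀ (if contain_variable q nv then (replaceVarA F q nv).1 else q)
        = (chainPairs F (PySem.Str.split₀ q) nv).reverse.foldl applyPass (PySem.Str.split₀ q)) :
    (PySem.Str.join "" [PySem.Str.join " "
        ((PySem.Str.split₀ (if contain_variable q nv then (replaceVarA F q nv).1 else q)).map
          (fun w => if w == v then nv else w)), " "], nv)
    = (PySem.Str.join "" [PySem.Str.join " "
        ((chainPairs (F+1) (PySem.Str.split₀ q) v).reverse.foldl applyPass (PySem.Str.split₀ q)), " "], nv) := by
  rw [hinner]
  have hch : chainPairs (F+1) (PySem.Str.split₀ q) v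
      = (v, nv) :: chainPairs F (PySem.Str.split₀ q) nv := by
    simp only [chainPairs]
    rw [if_pos hcv, hb]
  rw [hch, List.reverse_cons, List.foldl_append]
  simp [applyPass]

-- one unfolding step of A, assuming the inner call is already characterised
theorem parse_main (F : Nat) (q v : String) (hc : contain_variable q v = true)
    (hinner : ∀ nv, bump v = some nv →
        PySem.Str.split₀ (if contain_variable q nv then (replaceVarA F q nv).1 else q)
          = (chainPairs F (PySem.Str.split₀ q) nv).reverse.foldl applyPass (PySem.Str.split₀ q)) :
    replaceVarA (F+1) q v =
      match bump v with
      | none => (q, v)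
      | some nv =>
        (PySem.Str.join "" [PySem.Str.join " "
            ((chainPairs (F+1) (PySem.Str.split₀ q) v).reverse.foldl applyPass (PySem.Str.split₀ q)), " "], nv) := by
  have hcv : (PySem.Str.split₀ q).contains v = true := by simpa [contain_variable] using hc
  by_cases hu : PySem.Str.isIn "_" v = true
  · cases hsp : PySem.Str.split? v "_" with
    | none =>
      have hb : bump v = none := by unfold bump; rw [if_pos hu, hsp]
      rw [hb]
      simp only [replaceVarA]
      rw [if_pos hc, if_pos hu, hsp]
    | some l =>
      rcases l with _ | ⟨p, _ | ⟨i, _ | ⟨x, rest⟩⟩⟩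
      · have hb : bump v = none := by unfold bump; rw [if_pos hu, hsp]
        rw [hb]; simp only [replaceVarA]; rw [if_pos hc, if_pos hu, hsp]
      · have hb : bump v = none := by unfold bump; rw [if_pos hu, hsp]
        rw [hb]; simp only [replaceVarA]; rw [if_pos hc, if_pos hu, hsp]
      · cases hof : PySem.Int.ofStr? i with
        | none =>
          have hb : bump v = none := by unfold bump; rw [if_pos hu, hsp]; simp [hof]
          rw [hb]; simp only [replaceVarA]; rw [if_pos hc, if_pos hu, hsp]; simp [hof]
        | some n =>
          have hb : bump v = some (PySem.Str.join "" [p, "_", PySem.Int.toStr (n + 1)]) := by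
            unfold bump; rw [if_pos hu, hsp]; simp [hof]
          rw [hb]
          simp only [replaceVarA]
          rw [if_pos hc, if_pos hu, hsp]
          simp only [hof]
          exact some_branch F q v _ hcv hb (hinner _ hb)
      · have hb : bump v = none := by unfold bump; rw [if_pos hu, hsp]
        rw [hb]; simp only [replaceVarA]; rw [if_pos hc, if_pos hu, hsp]
  · have hb : bump v = some (PySem.Str.join "" [v, "_", PySem.Int.toStr 1]) := by
      unfold bump; rw [if_neg hu]
    rw [hb]
    simp only [replaceVarA]
    rw [if_pos hc, if_neg hu]
    simp only [zero_add]
    exact some_branch F q v _ hcv hb (hinner _ hb)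

-- main correspondence between A's recursion and B's chain-then-passes computation
theorem main_lemma : ∀ (f : Nat) (q v : String), contain_variable q v = true →
    replaceVarA (f+1) q v =
      match bump v with
      | none => (q, v)
      | some nv =>
        (PySem.Str.join "" [PySem.Str.join " "
            ((chainPairs (f+1) (PySem.Str.split₀ q) v).reverse.foldl applyPass (PySem.Str.split₀ q)), " "], nv) := by
  intro f
  induction f with
  | zero =>
    intro q v hc
    refine parse_main 0 q v hc ?_
    intro nv _
    by_cases hc2 : contain_variable q nv = true
    · rw [if_pos hc2]
      simp [replaceVarA, chainPairs]
    · rw [if_neg hc2]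
      show PySem.Str.split₀ q = (chainPairs 0 (PySem.Str.split₀ q) nv).reverse.foldl applyPass (PySem.Str.split₀ q)
      rfl
  | succ g ih =>
    intro q v hc
    refine parse_main (g+1) q v hc ?_
    intro nv hb
    by_cases hc2 : contain_variable q nv = true
    · rw [if_pos hc2]
      rw [ih q nv hc2]
      have hcv2 : (PySem.Str.split₀ q).contains nv = true := by
        simpa [contain_variable] using hc2
      cases hb2 : bump nv with
      | none =>
        have hch : chainPairs (g+1) (PySem.Str.split₀ q) nv = [] := by
          simp only [chainPairs]; rw [if_pos hcv2, hb2]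
        rw [hch]
        rfl
      | some nv2 =>
        apply split₀_strOf
        apply passes_wf
        · exact split₀_wf q
        · intro pr hpr
          have hpr' := chainPairs_mem _ _ _ pr (List.mem_reverse.mp hpr)
          exact bump_wf pr.1 pr.2 hpr'.2 (split₀_wf q pr.1 hpr'.1).2
    · rw [if_neg hc2]
      have hcv2 : (PySem.Str.split₀ q).contains nv = false := by
        have := hc2
        simp only [contain_variable] at this
        simpa using this
      rw [chainPairs_not_contains (g+1) _ nv hcv2]
      rfl

theorem pre_bump (q v : String) (hpre : Pre_replace_variable q v)
    (hc : (PySem.Str.split₀ q).contains v = true) : ∃ nv, bump v = some nv := by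
  by_cases hu : PySem.Str.isIn "_" v = true
  · obtain ⟨hl, hs⟩ := hpre hc hu
    cases hsp : PySem.Str.split? v "_" with
    | none =>
      exfalso
      have : ¬ (("_" : String).toList.isEmpty = true) := by decide
      simp [PySem.Str.split?, PySem.Chars.split?] at hsp
    | some l =>
      rw [hsp] at hl hs
      match l, hl with
      | [p, i], _ =>
        simp only [List.getD, List.getElem?_cons_succ, List.getElem?_cons_zero,
          Option.getD_some] at hs
        cases hof : PySem.Int.ofStr? i with
        | none => rw [hof] at hs; simp at hs
        | some n =>
          exact ⟨PySem.Str.join "" [p, "_", PySem.Int.toStr (n + 1)], by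
            unfold bump; rw [if_pos hu, hsp]; simp [hof]⟩
  · exact ⟨PySem.Str.join "" [v, "_", PySem.Int.toStr 1], by
      unfold bump; rw [if_neg hu]⟩

-- ===== VERDICT (by name: the statement is the Claim_ definition above) =====
theorem replace_variable_spec : Claim_equal_replace_variable := by
  intro q v _ hpre
  unfold Spec_replace_variable replace_variable replace_variable_alt
  by_cases hc : (PySem.Str.split₀ q).contains v = true
  · obtain ⟨nv, hnv⟩ := pre_bump q v hpre hc
    rw [main_lemma _ q v (by simpa [contain_variable] using hc), hnv]
    have hchain : chainPairs ((PySem.Str.split₀ q).length + 1) (PySem.Str.split₀ q) v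
        = (v, nv) :: chainPairs (PySem.Str.split₀ q).length (PySem.Str.split₀ q) nv := by
      have hm : v ∈ PySem.Str.split₀ q := by simpa using hc
      simp [chainPairs, hm, hnv]
    simp only [hc, if_true, hchain, List.headD_cons]
  · have hc' : (PySem.Str.split₀ q).contains v = false := by simpa using hc
    simp only [replaceVarA, contain_variable, hc', Bool.false_eq_true, if_false]
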